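-- pv_equiv track=rewrite | github.com/fengyouliang/springboot-leanrning | scripts/generate-book-labs-index.py | order_modules
-- ===== SOURCE A (Python) =====
-- PREFERRED_MODULE_ORDER = [
--     "springboot-basics",
--     "spring-core-beans",
--     "spring-core-aop",
--     "spring-core-aop-weaving",
--     "spring-core-tx",
--     "springboot-web-mvc",
--     "springboot-security",
--     "springboot-data-jpa",
--     "springboot-cache",
--     "springboot-async-scheduling",
--     "spring-core-events",
--     "spring-core-resources",
--     "spring-core-profiles",
--     "spring-core-validation",
--     "springboot-actuator",
--     "springboot-web-client",
--     "springboot-testing",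
--     "springboot-business-case",
-- ]
--
-- def order_modules(modules: list[str]) -> list[str]:
--     ordered: list[str] = []
--     for m in PREFERRED_MODULE_ORDER:
--         if m in modules:
--             ordered.append(m)
--     for m in sorted(modules):
--         if m not in ordered:
--             ordered.append(m)
--     return ordered
-- ===== SOURCE B (Python) =====
-- PREFERRED_MODULE_ORDER = [
--     "springboot-basics",
--     "spring-core-beans",
--     "spring-core-aop",
--     "spring-core-aop-weaving",
--     "spring-core-tx",
--     "springboot-web-mvc",
--     "springboot-security",
--     "springboot-data-jpa",
--     "springboot-cache",
--     "springboot-async-scheduling",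
--     "spring-core-events",
--     "spring-core-resources",
--     "spring-core-profiles",
--     "spring-core-validation",
--     "springboot-actuator",
--     "springboot-web-client",
--     "springboot-testing",
--     "springboot-business-case",
-- ]
--
-- _RANK = {m: i for i, m in enumerate(PREFERRED_MODULE_ORDER)}
-- _FALLBACK = len(PREFERRED_MODULE_ORDER)
--
-- def order_modules(modules: list[str]) -> list[str]:
--     return sorted(set(modules), key=lambda m: (_RANK.get(m, _FALLBACK), m))
-- ===== Notes on version B (the rewrite author's own statement) =====
-- stated objective: faster
-- what changed: A's two sequential loops (scan the preferred list for present modules, then scan the sorted input appending items not yet in the quadratic 'm not in ordered' list) are replaced by a single key-based sort of the deduplicated input, keyed by (index in PREFERRED_MODULE_ORDER or its length, module name).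
import Mathlib
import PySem

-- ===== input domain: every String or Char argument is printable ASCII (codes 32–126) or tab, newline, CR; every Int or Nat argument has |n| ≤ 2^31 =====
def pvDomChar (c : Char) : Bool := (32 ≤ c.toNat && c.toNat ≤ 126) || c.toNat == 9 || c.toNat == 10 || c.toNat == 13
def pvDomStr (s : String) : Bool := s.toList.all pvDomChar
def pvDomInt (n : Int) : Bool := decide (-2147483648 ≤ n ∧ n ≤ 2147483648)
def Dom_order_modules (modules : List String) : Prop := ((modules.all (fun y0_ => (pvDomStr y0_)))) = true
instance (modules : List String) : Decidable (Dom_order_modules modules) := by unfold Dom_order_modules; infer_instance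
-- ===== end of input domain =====

-- B replaces A's two sequential loops (preferred scan, then sorted-remainder scan with a linear
-- 'm not in ordered' check) by one key-based sort of the deduplicated input (rank in the preferred
-- list, then name); objective: faster (measured).

def preferredModuleOrder : List String := [
    "springboot-basics",
    "spring-core-beans",
    "spring-core-aop",
    "spring-core-aop-weaving",
    "spring-core-tx",
    "springboot-web-mvc",
    "springboot-security",
    "springboot-data-jpa",
    "springboot-cache",
    "springboot-async-scheduling",
    "spring-core-events",
    "spring-core-resources",
    "spring-core-profiles",
    "spring-core-validation",
    "springboot-actuator",
    "springboot-web-client",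
    "springboot-testing",
    "springboot-business-case"]

-- ===== PORT A =====
def order_modules (modules : List String) : List String :=
  let ordered := preferredModuleOrder.foldl
    (fun acc m => if modules.contains m then acc ++ [m] else acc) []
  (PySem.List.sorted modules (fun x => x) false).foldl
    (fun acc m => if acc.contains m then acc else acc ++ [m]) ordered

-- ===== PORT B =====
-- _RANK = {m: i for i, m in enumerate(PREFERRED_MODULE_ORDER)}
def rankDict : PySem.Dict String Int :=
  (PySem.List.enumerate preferredModuleOrder 0).foldl
    (fun d p => d.insert p.2 p.1) PySem.Dict.empty

-- sorted(set(modules), key=lambda m: (_RANK.get(m, _FALLBACK), m))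
def order_modules_alt (modules : List String) : List String :=
  PySem.List.sorted2 (PySem.Set.ofList modules)
    (fun m => rankDict.getD m (preferredModuleOrder.length : Int))
    (fun m => m) false

-- ===== PRECONDITION & SPEC =====
def Spec_order_modules (modules : List String) (out : List String) : Prop := out = order_modules_alt modules
instance (modules : List String) (out : List String) : Decidable (Spec_order_modules modules out) := by unfold Spec_order_modules; infer_instance

-- ===== CLAIM (what is proved, stated in full; the proofs are below) =====
def Claim_equal_order_modules : Prop := ∀ (modules : List String), Dom_order_modules modules → Spec_order_modules modules (order_modules modules)

-- ===== LEMMAS AND PROOFS =====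

-- abbreviations for the proofs
def pvKey1 (m : String) : Int := rankDict.getD m (preferredModuleOrder.length : Int)
def pvLex (m : String) : Lex (Int × String) := toLex (pvKey1 m, m)

lemma before_eq (a b : String) :
    (decide (pvKey1 a < pvKey1 b) || (!decide (pvKey1 b < pvKey1 a) && decide (a < b)))
      = decide (pvLex a < pvLex b) := by
  simp only [pvLex, Prod.Lex.lt_iff, ofLex_toLex]
  rcases lt_trichotomy (pvKey1 a) (pvKey1 b) with h|h|h
  · simp [h, not_lt_of_gt h]
  · simp [h]
  · simp [h, lt_asymm h, h.ne']

lemma sorted2_eq_sorted_lex (xs : List String) :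
    PySem.List.sorted2 xs pvKey1 (fun m => m) false = PySem.List.sorted xs pvLex false := by
  rw [PySem.List.sorted_eq_foldl_insertBy]
  show List.foldl (fun acc x => PySem.List.insertBy _ x acc) [] xs = _
  congr 1
  funext acc x
  congr 1
  funext a b
  exact before_eq a b

lemma ofList_sublist (xs : List String) : List.Sublist (PySem.Set.ofList xs) xs := by
  induction xs with
  | nil => simp [PySem.Set.ofList]
  | cons x xs ih =>
    rw [PySem.Set.ofList_cons]
    exact (List.filter_sublist.trans ih).cons₂ x

-- facts about the concrete rank dictionary
lemma keys_rankDict : rankDict.keys = preferredModuleOrder := by decide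

lemma key1_lt_pref : ∀ a ∈ preferredModuleOrder, pvKey1 a < (preferredModuleOrder.length : Int) := by
  decide

lemma key1_of_not_mem {a : String} (h : a ∉ preferredModuleOrder) :
    pvKey1 a = (preferredModuleOrder.length : Int) := by
  apply PySem.Dict.getD_of_not_contains
  rw [← Bool.not_eq_true, PySem.Dict.contains_iff_mem_keys, keys_rankDict]
  exact h

lemma pairwise_key1_pref :
    preferredModuleOrder.Pairwise (fun a b => pvKey1 a < pvKey1 b) := by decide

lemma order_modules_eq_alt (modules : List String) : order_modules modules = order_modules_alt modules := by
  -- characterize A's output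
  have hA : order_modules modules =
      PySem.Set.update
        (List.filter (fun m => modules.contains m) preferredModuleOrder)
        (PySem.List.sorted modules (fun x => x) false) := by
    unfold order_modules
    rw [PySem.List.foldl_append_if (fun m => modules.contains m) (fun m => m),
        List.nil_append, List.map_id']
    rfl
  set part1 := List.filter (fun m => modules.contains m) preferredModuleOrder with hpart1
  set sm := PySem.List.sorted modules (fun x => x) false with hsm
  rw [hA, PySem.Set.update_eq_append_filter]
  set part2 := List.filter (fun y => !PySem.Set.contains part1 y) (PySem.Set.ofList sm) with hpart2
  -- B's output as a lex sort
  unfold order_modules_alt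
  rw [show (fun m => rankDict.getD m (preferredModuleOrder.length : Int)) = pvKey1 from rfl,
      sorted2_eq_sorted_lex]
  -- memberships
  have hmem1 : ∀ {a}, a ∈ part1 → a ∈ preferredModuleOrder ∧ a ∈ modules := by
    intro a ha
    rw [hpart1, List.mem_filter] at ha
    exact ⟨ha.1, by simpa using ha.2⟩
  have hmem2 : ∀ {a}, a ∈ part2 → a ∈ modules ∧ a ∉ part1 := by
    intro a ha
    rw [hpart2, List.mem_filter] at ha
    refine ⟨?_, by simpa using ha.2⟩
    have := (PySem.Set.mem_ofList sm a).mp ha.1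
    rw [hsm, PySem.List.mem_sorted] at this
    exact this
  have hnp2 : ∀ {a}, a ∈ part2 → a ∉ preferredModuleOrder := by
    intro a ha hp
    exact (hmem2 ha).2 (by
      rw [hpart1, List.mem_filter]
      exact ⟨hp, by simpa using (hmem2 ha).1⟩)
  -- nodup
  have hnd1 : part1.Nodup := List.Nodup.filter _ (by decide)
  have hnd2 : part2.Nodup := List.Nodup.filter _ (PySem.Set.nodup_ofList sm)
  have hnd : (part1 ++ part2).Nodup := by
    rw [List.nodup_append]
    refine ⟨hnd1, hnd2, ?_⟩
    intro a ha b hb heq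
    exact (hmem2 hb).2 (heq ▸ ha)
  -- permutation
  refine (PySem.List.sorted_eq_of_perm_of_pairwise_lt _ _ _ ?_ ?_).symm
  · rw [List.perm_ext_iff_of_nodup hnd (PySem.Set.nodup_ofList modules)]
    intro a
    rw [List.mem_append, PySem.Set.mem_ofList]
    constructor
    · rintro (h | h)
      · exact (hmem1 h).2
      · exact (hmem2 h).1
    · intro h
      by_cases hp : a ∈ part1
      · exact Or.inl hp
      · refine Or.inr ?_
        rw [hpart2, List.mem_filter]
        refine ⟨?_, by simpa using hp⟩
        rw [PySem.Set.mem_ofList, hsm, PySem.List.mem_sorted]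
        exact h
  -- pairwise lex-increasing
  · rw [List.pairwise_append]
    refine ⟨?_, ?_, ?_⟩
    · -- within part1: ranks strictly increase
      have := (pairwise_key1_pref).sublist
        (List.filter_sublist (p := fun m => modules.contains m))
      exact this.imp (fun h => by
        simp only [Prod.Lex.lt_iff, pvLex, ofLex_toLex]; exact Or.inl h)
    · -- within part2: names strictly increase, ranks equal
      have hle : part2.Pairwise (fun a b => a ≤ b) := by
        have h1 : sm.Pairwise (fun a b => a ≤ b) := by
          rw [hsm]; exact PySem.List.sorted_pairwise modules (fun x => x)
        exact h1.sublist (List.filter_sublist.trans (ofList_sublist sm))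
      have hne : part2.Pairwise (fun a b => a ≠ b) := hnd2
      refine (hle.and hne).imp_of_mem ?_
      intro a b ha hb h
      simp only [Prod.Lex.lt_iff, pvLex, ofLex_toLex]
      refine Or.inr ⟨?_, lt_of_le_of_ne h.1 h.2⟩
      rw [key1_of_not_mem (hnp2 ha), key1_of_not_mem (hnp2 hb)]
    · -- across: part1 ranks < length = part2 ranks
      intro a ha b hb
      simp only [Prod.Lex.lt_iff, pvLex, ofLex_toLex]
      refine Or.inl ?_
      rw [key1_of_not_mem (hnp2 hb)]
      exact key1_lt_pref a (hmem1 ha).1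

-- ===== VERDICT (by name: the statement is the Claim_ definition above) =====
theorem order_modules_spec : Claim_equal_order_modules := by
  intro modules _
  exact order_modules_eq_alt modules
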